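-- pv_equiv track=rewrite | github.com/MaciekZ23/TEORIA_GRAFOW | ZAJECIA_2/ZAD4/Identycznosc.py | czy_identyczne_grafy
-- ===== SOURCE A (Python) =====
-- def czy_identyczne_grafy(graf1, graf2):
--     if(len(graf1) != len(graf2)):
--         return False
--
--     for wierzcholek in range(len(graf1)):
--         if(len(graf1[wierzcholek]) != len(graf2[wierzcholek])):
--             return False
--         licznik = {}
--         for sasiad in graf1[wierzcholek]:
--             licznik[sasiad] = licznik.get(sasiad, 0) + 1
--         for sasiad in graf2[wierzcholek]:
--             if(licznik.get(sasiad, 0) == 0):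
--                 return False
--             licznik[sasiad] -= 1
--     return True
-- ===== SOURCE B (Python) =====
-- def czy_identyczne_grafy(graf1, graf2):
--     if len(graf1) != len(graf2):
--         return False
--     for wierzcholek in range(len(graf1)):
--         if sorted(graf1[wierzcholek]) != sorted(graf2[wierzcholek]):
--             return False
--     return True
-- ===== Notes on version B (the rewrite author's own statement) =====
-- stated objective: simpler
-- what changed: Replaces the per-vertex hash-count-then-decrement multiset check with sorting both adjacency lists and comparing them for equality.
import Mathlib
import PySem

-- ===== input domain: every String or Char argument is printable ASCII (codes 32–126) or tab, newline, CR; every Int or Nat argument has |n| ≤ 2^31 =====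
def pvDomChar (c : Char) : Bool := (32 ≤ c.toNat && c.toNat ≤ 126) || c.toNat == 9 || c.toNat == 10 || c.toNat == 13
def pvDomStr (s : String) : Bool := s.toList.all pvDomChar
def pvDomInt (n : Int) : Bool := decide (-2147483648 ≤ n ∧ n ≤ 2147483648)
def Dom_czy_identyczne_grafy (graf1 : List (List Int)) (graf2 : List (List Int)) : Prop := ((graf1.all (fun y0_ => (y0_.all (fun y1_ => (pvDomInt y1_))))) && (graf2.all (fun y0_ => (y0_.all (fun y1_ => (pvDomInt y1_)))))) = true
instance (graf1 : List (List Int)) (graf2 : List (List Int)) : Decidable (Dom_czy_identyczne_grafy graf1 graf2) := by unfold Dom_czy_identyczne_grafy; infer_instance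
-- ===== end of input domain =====

-- B replaces A's per-vertex hash-count/decrement multiset check with sorting both adjacency lists and comparing them (simpler).


-- ===== PORT A =====
-- counter-building loop of A: licznik[s] = licznik.get(s, 0) + 1
def pvCountA (xs : List Int) : PySem.Dict Int Int :=
  xs.foldl (fun d s => d.insert s (d.getD s 0 + 1)) PySem.Dict.empty

-- consuming loop of A over graf2[w]: early False when a count is exhausted, else licznik[s] -= 1
def pvConsumeA (d : PySem.Dict Int Int) : List Int → Bool
  | [] => true
  | s :: rest =>
    if d.getD s 0 = 0 then false
    else pvConsumeA (d.modify s 0 (fun x => x - 1)) rest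

-- the for-loop over range(len(graf1)), walking both graphs vertex by vertex
def pvLoopA : List (List Int) → List (List Int) → Bool
  | [], _ => true
  | _ :: _, [] => true
  | l1 :: t1, l2 :: t2 =>
    if l1.length ≠ l2.length then false
    else if pvConsumeA (pvCountA l1) l2 then pvLoopA t1 t2 else false

def czy_identyczne_grafy (graf1 : List (List Int)) (graf2 : List (List Int)) : Bool :=
  if graf1.length ≠ graf2.length then false
  else pvLoopA graf1 graf2

-- ===== PORT B =====
-- B's loop: compare sorted adjacency lists vertex by vertex
def pvLoopB : List (List Int) → List (List Int) → Bool
  | [], _ => true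
  | _ :: _, [] => true
  | l1 :: t1, l2 :: t2 =>
    if PySem.List.sorted l1 (fun x => x) false ≠ PySem.List.sorted l2 (fun x => x) false then false
    else pvLoopB t1 t2

def czy_identyczne_grafy_alt (graf1 : List (List Int)) (graf2 : List (List Int)) : Bool :=
  if graf1.length ≠ graf2.length then false
  else pvLoopB graf1 graf2

-- ===== PRECONDITION & SPEC =====
def Spec_czy_identyczne_grafy (graf1 : List (List Int)) (graf2 : List (List Int)) (out : Bool) : Prop := out = czy_identyczne_grafy_alt graf1 graf2
instance (graf1 : List (List Int)) (graf2 : List (List Int)) (out : Bool) : Decidable (Spec_czy_identyczne_grafy graf1 graf2 out) := by unfold Spec_czy_identyczne_grafy; infer_instance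

-- ===== CLAIM (what is proved, stated in full; the proofs are below) =====
def Claim_equal_czy_identyczne_grafy : Prop := ∀ (graf1 : List (List Int)) (graf2 : List (List Int)), Dom_czy_identyczne_grafy graf1 graf2 → Spec_czy_identyczne_grafy graf1 graf2 (czy_identyczne_grafy graf1 graf2)

-- ===== LEMMAS AND PROOFS =====

theorem pvCountA_getD_aux (l : List Int) (d : PySem.Dict Int Int) (v : Int) :
    (l.foldl (fun d s => d.insert s (d.getD s 0 + 1)) d).getD v 0 = d.getD v 0 + l.count v := by
  induction l generalizing d with
  | nil => simp
  | cons a t ih =>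
    simp only [List.foldl_cons, ih, List.count_cons]
    by_cases h : v = a
    · subst h; simp [pysem]; ring
    · simp only [pysem]
      rw [if_neg h]
      simp [Ne.symm h]

theorem pvCountA_getD (l : List Int) (v : Int) :
    (pvCountA l).getD v 0 = l.count v := by
  rw [pvCountA, pvCountA_getD_aux]
  simp [pysem]

theorem pvConsumeA_iff (l2 : List Int) (d : PySem.Dict Int Int)
    (hnn : ∀ v, 0 ≤ d.getD v 0) :
    pvConsumeA d l2 = true ↔ ∀ v, (l2.count v : Int) ≤ d.getD v 0 := by
  induction l2 generalizing d with
  | nil => simpa [pvConsumeA] using hnn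
  | cons s rest ih =>
    simp only [pvConsumeA]
    by_cases h : d.getD s 0 = 0
    · simp only [h, if_true]
      constructor
      · intro hh; exact absurd hh (by simp)
      · intro hall
        have := hall s
        simp [h] at this
        omega
    · simp only [h, if_false]
      rw [ih]
      · constructor
        · intro hall v
          have := hall v
          simp [pysem, List.count_cons] at this ⊢
          by_cases hv : v = s
          · subst hv; simp at this; have := hnn v; omega
          · simp [hv] at this ⊢; omega
        · intro hall v
          have := hall v
          simp [pysem, List.count_cons] at this ⊢
          by_cases hv : v = s
          · subst hv; simp; omega
          · simp [hv]; omega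
      · intro v
        have := hnn v
        simp [pysem]
        by_cases hv : v = s
        · subst hv; simp; have := hnn v; omega
        · simp [hv]; omega


theorem pvVertex_iff (l1 l2 : List Int) :
    (l1.length = l2.length ∧ pvConsumeA (pvCountA l1) l2 = true) ↔
      PySem.List.sorted l1 (fun x => x) false = PySem.List.sorted l2 (fun x => x) false := by
  rw [PySem.List.sorted_id_eq_sorted_id_iff_perm]
  have hnn : ∀ v, 0 ≤ (pvCountA l1).getD v 0 := fun v => by rw [pvCountA_getD]; positivity
  rw [pvConsumeA_iff _ _ hnn]
  constructor
  · rintro ⟨hlen, hc⟩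
    have hsub : List.Subperm l2 l1 := by
      refine List.subperm_ext_iff.mpr fun x _ => ?_
      have := hc x; rw [pvCountA_getD] at this; exact_mod_cast this
    exact ((hsub.perm_of_length_le hlen.le)).symm
  · intro hp
    refine ⟨hp.length_eq, fun v => ?_⟩
    rw [pvCountA_getD]
    exact_mod_cast (hp.count_eq v).ge

theorem pvLoop_eq (g1 g2 : List (List Int)) : pvLoopA g1 g2 = pvLoopB g1 g2 := by
  induction g1 generalizing g2 with
  | nil => cases g2 <;> rfl
  | cons l1 t1 ih =>
    cases g2 with
    | nil => rfl
    | cons l2 t2 =>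
      simp only [pvLoopA, pvLoopB]
      by_cases hs : PySem.List.sorted l1 (fun x => x) false = PySem.List.sorted l2 (fun x => x) false
      · obtain ⟨hlen, hc⟩ := (pvVertex_iff l1 l2).mpr hs
        simp [hlen, hc, hs, ih]
      · rw [if_pos hs]
        by_cases hlen : l1.length = l2.length
        · have hc : pvConsumeA (pvCountA l1) l2 = false := by
            by_contra hcc
            exact hs ((pvVertex_iff l1 l2).mp ⟨hlen, by simpa using hcc⟩)
          simp [hlen, hc]
        · simp [hlen]

-- ===== VERDICT (by name: the statement is the Claim_ definition above) =====
theorem czy_identyczne_grafy_spec : Claim_equal_czy_identyczne_grafy := by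
  intro g1 g2 _
  unfold Spec_czy_identyczne_grafy czy_identyczne_grafy czy_identyczne_grafy_alt
  rw [pvLoop_eq]
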